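-- pv_equiv track=rewrite | github.com/pypi-data/pypi-mirror-276 | packages/qbraid-core/qbraid_core-0.1.11a0.tar.gz/qbraid_core-0.1.11a0/qbraid_core/services/quantum/runner.py | _measurements_to_counts
-- ===== SOURCE A (Python) =====
-- def _measurements_to_counts(counts: list) -> dict[str, int]:
--     """Convert measurements list to histogram data."""
--     row_strings = ["".join(map(str, row)) for row in counts]
--     hist_data = {row: row_strings.count(row) for row in set(row_strings)}
--     counts_dict = {key.replace(" ", ""): value for key, value in hist_data.items()}
--     num_bits = max(len(key) for key in counts_dict)
--     all_keys = [format(i, f"0{num_bits}b") for i in range(2**num_bits)]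
--     final_counts = {key: counts_dict.get(key, 0) for key in sorted(all_keys)}
--     non_zero_counts = {key: value for key, value in final_counts.items() if value != 0}
--     return non_zero_counts
-- ===== SOURCE B (Python) =====
-- def _measurements_to_counts(counts: list) -> dict[str, int]:
--     """Convert measurements list to histogram data."""
--     tally = {}
--     for row in counts:
--         key = "".join(map(str, row))
--         tally[key] = tally.get(key, 0) + 1
--     num_bits = max(map(len, tally))
--
--     # The histogram ranges over the num_bits-bit basis states, in order; only an
--     # observed state can have a non-zero count, so visit the tallied keys
--     # (sorted, as the basis states are) instead of enumerating all 2**num_bits.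
--     def is_basis_state(key):
--         return len(key) == num_bits and set(key) <= {"0", "1"}
--
--     return {key: tally[key] for key in sorted(tally) if is_basis_state(key)}
-- ===== Notes on version B (the rewrite author's own statement) =====
-- stated objective: faster
-- what changed: B tallies rows in one dict pass and emits the sorted observed keys that are full-width basis states, instead of counting each distinct row with list.count and enumerating all 2**num_bits bitstrings.
-- intended difference: When every measurement row is empty (all keys are the empty string, so num_bits=0), A returns {} because it enumerates format(0,'00b')='0' and drops the actual '' key, while B returns {'': n}; B's value is intended since the observed outcome should not silently vanish from the histogram. — e.g. on _measurements_to_counts([[]]): A returns [], B returns [("", 1)]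
-- outside the precondition, e.g. on _measurements_to_counts([]): A raises ValueError, B raises ValueError
import Mathlib
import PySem

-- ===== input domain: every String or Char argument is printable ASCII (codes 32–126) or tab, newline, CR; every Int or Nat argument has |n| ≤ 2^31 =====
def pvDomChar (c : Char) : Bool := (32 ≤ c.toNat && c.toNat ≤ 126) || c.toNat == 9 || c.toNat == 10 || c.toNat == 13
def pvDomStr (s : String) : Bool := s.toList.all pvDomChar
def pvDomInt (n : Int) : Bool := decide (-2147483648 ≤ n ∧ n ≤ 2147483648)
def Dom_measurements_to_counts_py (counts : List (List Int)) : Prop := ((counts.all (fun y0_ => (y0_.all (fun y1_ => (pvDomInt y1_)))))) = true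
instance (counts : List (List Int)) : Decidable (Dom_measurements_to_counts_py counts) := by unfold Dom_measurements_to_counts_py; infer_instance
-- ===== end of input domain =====

-- B replaces A's per-key list.count passes and 2**num_bits key enumeration by one tally pass and a
-- sort of the observed keys only (return value only; neither version mutates its argument).

-- ===== PORT A =====
-- A-side helpers: one helper per line of A, used in the same order A's lines run.
-- format(i, f"0{w}b") for a nonnegative i (A only formats i from range(2**num_bits)): zero-pad format(i, 'b')
def pvFmtBin (w : Nat) (i : Int) : String :=
  String.ofList (List.replicate (w - (PySem.Int.toBinChars i).length) '0' ++ PySem.Int.toBinChars i)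

-- ["".join(map(str, row)) for row in counts]
def pvRowStrings (counts : List (List Int)) : List String :=
  counts.map (fun row => PySem.Str.join "" (row.map PySem.Int.toStr))

-- {row: row_strings.count(row) for row in set(row_strings)}   (iterating set(row_strings) is ported
-- through PySem.Set.ofList: nothing A returns depends on that iteration order — the keys are
-- distinct, row_strings.count is order-independent, and so is the later max over key lengths)
def pvHistData (row_strings : List String) : PySem.Dict String Int :=
  (PySem.Set.ofList row_strings).foldl
    (fun d row => d.insert row ((row_strings.count row : Int))) PySem.Dict.empty

-- {key.replace(" ", ""): value for key, value in hist_data.items()}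
def pvCountsDict (hist_data : PySem.Dict String Int) : PySem.Dict String Int :=
  hist_data.items.foldl
    (fun d p => d.insert (PySem.Str.replace p.1 " " "") p.2) PySem.Dict.empty

-- [format(i, f"0{num_bits}b") for i in range(2**num_bits)]  (num_bits ≥ 0 is a string length,
-- so Python's 2**num_bits is 2 ^ num_bits.toNat)
def pvAllKeys (num_bits : Nat) : List String :=
  (PySem.List.pyRange 0 ((2 : Int) ^ num_bits) 1).map (fun i => pvFmtBin num_bits i)

-- {key: counts_dict.get(key, 0) for key in sorted(all_keys)}
-- sorted(all_keys) (no key, ascending) is ported as the stable merge sort on String's order — the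
-- same list CPython's timsort returns; the comprehension's keys are the distinct sorted bitstrings,
-- so the resulting dict is exactly the association list of (key, value) pairs in that key order
-- (building it by repeated Dict.insert would compute the same dict, quadratically in 2**num_bits)
def pvFinalCounts (counts_dict : PySem.Dict String Int) (all_keys : List String) : PySem.Dict String Int :=
  PySem.Dict.mk ((all_keys.mergeSort (fun a b => decide (a ≤ b))).map
    (fun key => (key, counts_dict.getD key 0)))

-- {key: value for key, value in final_counts.items() if value != 0}
def pvNonZero (final_counts : PySem.Dict String Int) : PySem.Dict String Int :=
  final_counts.items.foldl
    (fun d p => if p.2 ≠ 0 then d.insert p.1 p.2 else d) PySem.Dict.empty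

def measurements_to_counts_py (counts : List (List Int)) : List (String × Int) :=
  let row_strings := pvRowStrings counts
  let counts_dict := pvCountsDict (pvHistData row_strings)
  match PySem.List.max? (counts_dict.keys.map (fun k => PySem.Str.len k)) (fun x => x) with
  | none => []            -- unreachable: max() raises on an empty sequence; Pre_ excludes counts = []
  | some num_bits =>
    (pvNonZero (pvFinalCounts counts_dict (pvAllKeys num_bits.toNat))).items

-- ===== PORT B =====
-- literal port of Source B: the tally loop, then the dict comprehension over sorted(tally) filtered by
-- is_basis_state, as a fold of Dict.insert; set(key) <= {"0", "1"} is PySem.Set.issubset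
def pvTally (counts : List (List Int)) : PySem.Dict String Int :=
  counts.foldl
    (fun d row =>
      let key := PySem.Str.join "" (row.map PySem.Int.toStr)
      d.insert key (d.getD key 0 + 1)) PySem.Dict.empty

def pvIsBasisState (num_bits : Int) (key : String) : Bool :=
  PySem.Str.len key == num_bits &&
    PySem.Set.issubset (PySem.Set.ofList key.toList) (PySem.Set.ofList ['0', '1'])

def measurements_to_counts_py_alt (counts : List (List Int)) : List (String × Int) :=
  let tally := pvTally counts
  match PySem.List.max? (tally.keys.map (fun k => PySem.Str.len k)) (fun x => x) with
  | none => []            -- unreachable: max() raises on an empty sequence; Pre_ excludes counts = []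
  | some num_bits =>
    (((PySem.List.sorted tally.keys (fun k => k) false).filter
        (fun key => pvIsBasisState num_bits key)).foldl
      (fun d key => d.insert key (tally.getD key 0)) PySem.Dict.empty).items

-- ===== PRECONDITION & SPEC =====
-- Pre_ excludes only counts = [], where both A and B raise ValueError (max() of an empty sequence)
def Pre_measurements_to_counts_py (counts : List (List Int)) : Prop := counts ≠ []
instance (counts : List (List Int)) : Decidable (Pre_measurements_to_counts_py counts) := by unfold Pre_measurements_to_counts_py; infer_instance
def pvWitness_measurements_to_counts_py : List (List Int) := [[0, 1], [0, 1], [1, 1]]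

-- When every measurement row is empty (all keys are "", so num_bits = 0), A returns {} because it
-- enumerates format(0,'00b') = "0" and drops the actual "" key, while B returns {"": n}; B's value
-- is intended since the observed outcome should not silently vanish from the histogram.
def D_measurements_to_counts_py (counts : List (List Int)) : Prop :=
  counts ≠ [] ∧ ∀ row ∈ counts, row = []
instance (counts : List (List Int)) : Decidable (D_measurements_to_counts_py counts) := by unfold D_measurements_to_counts_py; infer_instance

def Spec_measurements_to_counts_py (counts : List (List Int)) (out : List (String × Int)) : Prop := ¬ D_measurements_to_counts_py counts → out = measurements_to_counts_py_alt counts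
instance (counts : List (List Int)) (out : List (String × Int)) : Decidable (Spec_measurements_to_counts_py counts out) := by unfold Spec_measurements_to_counts_py; infer_instance

def pvDiffWitness_measurements_to_counts_py : List (List Int) := [[]]
def pvDiffWitnessOut_measurements_to_counts_py : (List (String × Int)) × (List (String × Int)) := ([], [("", 1)])

-- ===== CLAIM (what is proved, stated in full; the proofs are below) =====
def Claim_unchanged_measurements_to_counts_py : Prop := ∀ (counts : List (List Int)), Dom_measurements_to_counts_py counts → Pre_measurements_to_counts_py counts → Spec_measurements_to_counts_py counts (measurements_to_counts_py counts)
def Claim_changed_measurements_to_counts_py : Prop := Dom_measurements_to_counts_py (pvDiffWitness_measurements_to_counts_py) ∧ Pre_measurements_to_counts_py (pvDiffWitness_measurements_to_counts_py) ∧ D_measurements_to_counts_py (pvDiffWitness_measurements_to_counts_py) ∧ measurements_to_counts_py (pvDiffWitness_measurements_to_counts_py) = pvDiffWitnessOut_measurements_to_counts_py.1 ∧ measurements_to_counts_py_alt (pvDiffWitness_measurements_to_counts_py) = pvDiffWitnessOut_measurements_to_counts_py.2 ∧ pvDiffWitnessOut_measurements_to_counts_py.1 ≠ pvDiffWitnes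sOut_measurements_to_counts_py.2
def Claim_exact_measurements_to_counts_py : Prop := ∀ (counts : List (List Int)), Dom_measurements_to_counts_py counts → Pre_measurements_to_counts_py counts → D_measurements_to_counts_py counts → measurements_to_counts_py counts ≠ measurements_to_counts_py_alt counts

-- ===== LEMMAS AND PROOFS =====

-- ---- Nat.toDigits (the engine behind str(n) and format(n, 'b')) ----

theorem pv_tdc_acc (b : Nat) : ∀ (f n : Nat) (acc : List Char),
    Nat.toDigitsCore b f n acc = Nat.toDigitsCore b f n [] ++ acc := by
  intro f
  induction f with
  | zero => intro n acc; simp [Nat.toDigitsCore]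
  | succ f ih =>
    intro n acc
    simp only [Nat.toDigitsCore]
    by_cases h : n / b = 0
    · simp [h]
    · simp only [h, if_false]
      rw [ih (n / b) (Nat.digitChar (n % b) :: acc), ih (n / b) [Nat.digitChar (n % b)]]
      simp

theorem pv_tdc_fuel (b : Nat) (hb : 2 ≤ b) : ∀ (n f : Nat) (acc : List Char), n + 1 ≤ f →
    Nat.toDigitsCore b f n acc = Nat.toDigitsCore b (n + 1) n acc := by
  intro n
  induction n using Nat.strong_induction_on with
  | _ n ih =>
    intro f acc hf
    obtain ⟨f, rfl⟩ : ∃ f', f = f' + 1 := ⟨f - 1, by omega⟩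
    simp only [Nat.toDigitsCore]
    by_cases h : n / b = 0
    · simp [h]
    · simp only [h, if_false]
      have hn : n ≠ 0 := by rintro rfl; simp at h
      have hlt : n / b < n := Nat.div_lt_self (by omega) (by omega)
      rw [ih (n / b) hlt f _ (by omega), ih (n / b) hlt n _ (by omega)]

theorem pv_td_ne_nil (b n : Nat) : Nat.toDigits b n ≠ [] := by
  simp only [Nat.toDigits, Nat.toDigitsCore]
  by_cases h : n / b = 0
  · simp [h]
  · simp only [h, if_false]
    rw [pv_tdc_acc]
    simp

theorem pv_td2_small (n : Nat) (h : n < 2) : Nat.toDigits 2 n = [Nat.digitChar n] := by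
  interval_cases n <;> rfl

theorem pv_td2_step (n : Nat) (h : 2 ≤ n) :
    Nat.toDigits 2 n = Nat.toDigits 2 (n / 2) ++ [Nat.digitChar (n % 2)] := by
  have h2 : n / 2 ≠ 0 := by omega
  conv_lhs => simp only [Nat.toDigits, Nat.toDigitsCore]
  simp only [h2, if_false]
  rw [pv_tdc_fuel 2 le_rfl (n / 2) n _ (by omega), pv_tdc_acc]
  rfl

theorem pv_td10_mem : ∀ (f n : Nat) (acc : List Char), ∀ c ∈ Nat.toDigitsCore 10 f n acc,
    c ∈ acc ∨ ∃ m, m < 10 ∧ c = Nat.digitChar m := by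
  intro f
  induction f with
  | zero => intro n acc c hc; exact Or.inl hc
  | succ f ih =>
    intro n acc c hc
    simp only [Nat.toDigitsCore] at hc
    by_cases h : n / 10 = 0
    · simp only [h, if_true] at hc
      rcases List.mem_cons.mp hc with h' | h'
      · exact Or.inr ⟨n % 10, Nat.mod_lt _ (by omega), h'⟩
      · exact Or.inl h'
    · simp only [h, if_false] at hc
      rcases ih (n / 10) _ c hc with h' | h'
      · rcases List.mem_cons.mp h' with h'' | h''
        · exact Or.inr ⟨n % 10, Nat.mod_lt _ (by omega), h''⟩
        · exact Or.inl h''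
      · exact Or.inr h'

-- ---- str(int) keys contain no space, so key.replace(" ", "") is the key itself ----

theorem pv_toChars_no_space (n : Int) : ' ' ∉ PySem.Int.toChars n := by
  unfold PySem.Int.toChars
  have key : ∀ m : Nat, ' ' ∉ Nat.toDigits 10 m := by
    intro m hm
    rcases pv_td10_mem _ _ _ _ hm with h | ⟨k, hk, he⟩
    · simp at h
    · interval_cases k <;> exact absurd he (by decide)
  split
  · intro h
    rcases List.mem_cons.mp h with h | h
    · simp at h
    · exact key _ h
  · exact key _

theorem pv_mem_intersperse {α : Type} (sep a : α) : ∀ (xs : List α), a ∈ xs.intersperse sep → a = sep ∨ a ∈ xs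
  | [] => by simp
  | [x] => by intro h; right; simpa using h
  | x :: y :: xs => by
    simp only [List.intersperse, List.mem_cons]
    rintro (rfl | rfl | h)
    · right; left; rfl
    · left; rfl
    · rcases pv_mem_intersperse sep a (y :: xs) h with h' | h'
      · exact Or.inl h'
      · rcases List.mem_cons.mp h' with rfl | hh
        · right; right; left; rfl
        · right; right; right; exact hh

theorem pv_key_no_space (row : List Int) :
    ' ' ∉ (PySem.Str.join "" (row.map PySem.Int.toStr)).toList := by
  rw [PySem.Str.toList_join]
  intro h
  simp only [PySem.Chars.join, List.intercalate, List.mem_flatten] at h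
  obtain ⟨l, hl, hc⟩ := h
  rcases pv_mem_intersperse _ _ _ hl with rfl | hl
  · simp at hc
  · simp only [List.mem_map] at hl
    obtain ⟨s, hs, rfl⟩ := hl
    obtain ⟨m, hm, rfl⟩ := hs
    rw [PySem.Int.toList_toStr] at hc
    exact pv_toChars_no_space m hc

theorem pv_replace_go (fuel : Nat) : ∀ (l acc : List Char), ' ' ∉ l →
    PySem.Chars.replace.go [' '] [] fuel l acc = acc.reverse ++ l := by
  induction fuel with
  | zero => intro l acc h; rfl
  | succ fuel ih =>
    intro l acc h
    match l with
    | [] => simp [PySem.Chars.replace.go]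
    | c :: t =>
      have hc : c ≠ ' ' := fun hc => h (hc ▸ List.mem_cons_self)
      have hpre : [' '].isPrefixOf (c :: t) = false := by
        simp [List.isPrefixOf]
        exact fun hcc => absurd hcc.symm hc
      simp only [PySem.Chars.replace.go, hpre, Bool.false_eq_true, if_false]
      rw [ih t (c :: acc) (fun ht => h (List.mem_cons_of_mem c ht))]
      simp

theorem pv_replace_id (s : String) (h : ' ' ∉ s.toList) : PySem.Str.replace s " " "" = s := by
  apply String.toList_inj.mp
  rw [PySem.Str.toList_replace]
  have h1 : (" " : String).toList = [' '] := by decide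
  have h2 : ("" : String).toList = [] := by decide
  rw [h1, h2]
  unfold PySem.Chars.replace
  simp only [List.isEmpty_cons, Bool.false_eq_true, if_false]
  rw [pv_replace_go _ _ _ h]
  rfl

-- ---- the list of zero-padded binary keys ----

-- pvB w j = format(j, f'0{w}b') at the character level; pvKeys w = A's all_keys list
def pvBKey (w j : Nat) : List Char :=
  List.replicate (w - (Nat.toDigits 2 j).length) '0' ++ Nat.toDigits 2 j

def pvKeys (w : Nat) : List (List Char) := (List.range (2 ^ w)).map (pvBKey w)

theorem pv_td2_len_le (w j : Nat) (h1 : 1 ≤ w) (hj : j < 2 ^ w) :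
    (Nat.toDigits 2 j).length ≤ w :=
  Nat.toDigits_length 2 j w h1 hj

theorem pvBKey_len (w j : Nat) (h1 : 1 ≤ w) (hj : j < 2 ^ w) : (pvBKey w j).length = w := by
  have := pv_td2_len_le w j h1 hj
  simp [pvBKey]
  omega

theorem pvBKey_zero_cons (w j : Nat) (h1 : 1 ≤ w) (hj : j < 2 ^ w) :
    pvBKey (w + 1) j = '0' :: pvBKey w j := by
  have := pv_td2_len_le w j h1 hj
  unfold pvBKey
  rw [show w + 1 - (Nat.toDigits 2 j).length = (w - (Nat.toDigits 2 j).length) + 1 by omega]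
  rw [List.replicate_succ]
  simp

theorem pv_td2_one (w : Nat) (h1 : 1 ≤ w) : ∀ j, j < 2 ^ w →
    Nat.toDigits 2 (2 ^ w + j) = '1' :: pvBKey w j := by
  induction w, h1 using Nat.le_induction with
  | base =>
    intro j hj
    interval_cases j <;> decide
  | succ w h1 ih =>
    intro j hj
    have h2w : 2 ^ (w + 1) = 2 * 2 ^ w := by ring
    have h1w : 1 ≤ 2 ^ w := Nat.one_le_two_pow
    rw [pv_td2_step _ (by omega)]
    have hdiv : (2 ^ (w + 1) + j) / 2 = 2 ^ w + j / 2 := by omega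
    have hmod : (2 ^ (w + 1) + j) % 2 = j % 2 := by omega
    rw [hdiv, hmod, ih (j / 2) (by omega)]
    by_cases h2 : 2 ≤ j
    · -- toDigits 2 j = toDigits 2 (j/2) ++ [digitChar (j%2)]
      have hstep := pv_td2_step j h2
      unfold pvBKey
      rw [hstep]
      have hX : (Nat.toDigits 2 (j / 2) ++ [(j % 2).digitChar]).length
          = (Nat.toDigits 2 (j / 2)).length + 1 := by simp
      rw [hX, show w + 1 - ((Nat.toDigits 2 (j / 2)).length + 1)
            = w - (Nat.toDigits 2 (j / 2)).length from by omega]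
      simp
    · -- j < 2 : j / 2 = 0, toDigits 2 0 = ['0']
      have hj2 : j / 2 = 0 := by omega
      have hjm : j % 2 = j := Nat.mod_eq_of_lt (by omega)
      have h0 : Nat.toDigits 2 0 = ['0'] := by decide
      have hjj : Nat.toDigits 2 j = [Nat.digitChar j] := pv_td2_small j (by omega)
      rw [hj2, hjm]
      unfold pvBKey
      rw [h0, hjj]
      simp only [List.length_singleton, List.cons_append, List.append_assoc, List.nil_append]
      congr 1
      rw [show ('0' :: [j.digitChar]) = ['0'] ++ [j.digitChar] from rfl, ← List.append_assoc,
        ← List.replicate_succ', show w - 1 + 1 = w from by omega, show w + 1 - 1 = w from by omega]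

theorem pvBKey_one_cons (w j : Nat) (h1 : 1 ≤ w) (hj : j < 2 ^ w) :
    pvBKey (w + 1) (2 ^ w + j) = '1' :: pvBKey w j := by
  have hlen : (Nat.toDigits 2 (2 ^ w + j)).length = w + 1 := by
    rw [pv_td2_one w h1 j hj]
    simp [pvBKey_len w j h1 hj]
  conv_lhs => unfold pvBKey
  rw [hlen]
  simp only [Nat.sub_self, List.replicate_zero, List.nil_append]
  exact pv_td2_one w h1 j hj

theorem pvKeys_succ (w : Nat) (h1 : 1 ≤ w) :
    pvKeys (w + 1) = (pvKeys w).map ('0' :: ·) ++ (pvKeys w).map ('1' :: ·) := by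
  unfold pvKeys
  rw [show 2 ^ (w + 1) = 2 ^ w + 2 ^ w by ring, List.range_add, List.map_append]
  congr 1
  · rw [List.map_map]
    exact List.map_congr_left fun j hj =>
      pvBKey_zero_cons w j h1 (List.mem_range.mp hj)
  · rw [List.map_map, List.map_map]
    exact List.map_congr_left fun j hj => by
      simpa using pvBKey_one_cons w j h1 (List.mem_range.mp hj)

theorem pvKeys_one : pvKeys 1 = [['0'], ['1']] := by decide

theorem pvKeys_pairwise (w : Nat) (h1 : 1 ≤ w) : (pvKeys w).Pairwise (· < ·) := by
  induction w, h1 using Nat.le_induction with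
  | base => decide
  | succ w h1 ih =>
    rw [pvKeys_succ w h1]
    rw [List.pairwise_append]
    refine ⟨?_, ?_, ?_⟩
    · rw [List.pairwise_map]
      exact ih.imp fun h => by
        rw [List.cons_lt_cons_iff]; exact Or.inr ⟨rfl, h⟩
    · rw [List.pairwise_map]
      exact ih.imp fun h => by
        rw [List.cons_lt_cons_iff]; exact Or.inr ⟨rfl, h⟩
    · intro a ha b hb
      obtain ⟨a', _, rfl⟩ := List.mem_map.mp ha
      obtain ⟨b', _, rfl⟩ := List.mem_map.mp hb
      rw [List.cons_lt_cons_iff]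
      exact Or.inl (by decide)

theorem pvKeys_mem (w : Nat) (h1 : 1 ≤ w) (l : List Char) :
    l ∈ pvKeys w ↔ l.length = w ∧ ∀ c ∈ l, c = '0' ∨ c = '1' := by
  induction w, h1 using Nat.le_induction generalizing l with
  | base =>
    rw [pvKeys_one]
    constructor
    · intro h
      rcases List.mem_cons.mp h with rfl | h
      · exact ⟨rfl, fun c hc => by rw [List.mem_singleton.mp hc]; exact Or.inl rfl⟩
      · rcases List.mem_cons.mp h with rfl | h
        · exact ⟨rfl, fun c hc => by rw [List.mem_singleton.mp hc]; exact Or.inr rfl⟩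
        · simp at h
    · rintro ⟨hlen, hc⟩
      match l, hlen with
      | [c], _ =>
        rcases hc c (by simp) with rfl | rfl
        · exact List.mem_cons_self
        · exact List.mem_cons_of_mem _ List.mem_cons_self
  | succ w h1 ih =>
    rw [pvKeys_succ w h1]
    simp only [List.mem_append, List.mem_map]
    constructor
    · rintro (⟨l', hl', rfl⟩ | ⟨l', hl', rfl⟩)
      · obtain ⟨hlen, hc⟩ := (ih l').mp hl'
        exact ⟨by simp [hlen], by
          intro c hc'
          rcases List.mem_cons.mp hc' with rfl | h
          · exact Or.inl rfl
          · exact hc c h⟩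
      · obtain ⟨hlen, hc⟩ := (ih l').mp hl'
        exact ⟨by simp [hlen], by
          intro c hc'
          rcases List.mem_cons.mp hc' with rfl | h
          · exact Or.inr rfl
          · exact hc c h⟩
    · rintro ⟨hlen, hc⟩
      match l with
      | c :: t =>
        have ht : t ∈ pvKeys w := (ih t).mpr ⟨by simpa using hlen,
          fun c' hc' => hc c' (List.mem_cons_of_mem _ hc')⟩
        rcases hc c List.mem_cons_self with rfl | rfl
        · exact Or.inl ⟨t, ht, rfl⟩
        · exact Or.inr ⟨t, ht, rfl⟩

-- ---- all_keys at the String level ----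

theorem pv_toBinChars_natCast (j : Nat) : PySem.Int.toBinChars (j : Int) = Nat.toDigits 2 j := by
  unfold PySem.Int.toBinChars
  rw [if_neg (by omega)]
  simp

theorem pvAllKeys_eq (w : Nat) : pvAllKeys w = (pvKeys w).map String.ofList := by
  unfold pvAllKeys pvKeys
  rw [show ((2 : Int) ^ w) = ((2 ^ w : Nat) : Int) by push_cast; ring,
    PySem.List.pyRange_zero_natCast, List.map_map, List.map_map]
  refine List.map_congr_left fun j hj => ?_
  simp only [Function.comp_apply, pvFmtBin, pvBKey, pv_toBinChars_natCast]

theorem pv_ofList_lt (a b : List Char) : String.ofList a < String.ofList b ↔ a < b := by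
  rw [String.lt_iff_toList_lt]
  simp

theorem pvAllKeys_pairwise (w : Nat) (h1 : 1 ≤ w) : (pvAllKeys w).Pairwise (· < ·) := by
  rw [pvAllKeys_eq, List.pairwise_map]
  exact (pvKeys_pairwise w h1).imp fun h => (pv_ofList_lt _ _).mpr h

theorem pvAllKeys_mem (w : Nat) (h1 : 1 ≤ w) (s : String) :
    s ∈ pvAllKeys w ↔ s.toList.length = w ∧ ∀ c ∈ s.toList, c = '0' ∨ c = '1' := by
  rw [pvAllKeys_eq, ← pvKeys_mem w h1]
  constructor
  · rintro h
    obtain ⟨l, hl, rfl⟩ := List.mem_map.mp h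
    simpa using hl
  · intro h
    exact List.mem_map.mpr ⟨s.toList, h, by simp⟩

-- ---- the basis-state test, as a membership condition ----

theorem pv_issubset_binary (l : List Char) :
    PySem.Set.issubset (PySem.Set.ofList l) (PySem.Set.ofList ['0', '1'])
      = l.all (fun c => c == '0' || c == '1') := by
  by_cases h : ∀ c ∈ l, c = '0' ∨ c = '1'
  · have h1 : PySem.Set.issubset (PySem.Set.ofList l) (PySem.Set.ofList ['0', '1']) = true := by
      rw [PySem.Set.issubset_iff]
      intro x hx
      rcases h x ((PySem.Set.mem_ofList l x).mp hx) with rfl | rfl <;>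
        · rw [PySem.Set.mem_ofList]; simp
    have h2 : l.all (fun c => c == '0' || c == '1') = true := by
      rw [List.all_eq_true]
      intro c hc
      rcases h c hc with rfl | rfl <;> simp
    rw [h1, h2]
  · push Not at h
    obtain ⟨c, hc, hc0, hc1⟩ := h
    have h1 : PySem.Set.issubset (PySem.Set.ofList l) (PySem.Set.ofList ['0', '1']) = false := by
      rw [Bool.eq_false_iff]
      intro hsub
      rw [PySem.Set.issubset_iff] at hsub
      have := hsub c ((PySem.Set.mem_ofList l c).mpr hc)
      rw [PySem.Set.mem_ofList] at this
      rcases List.mem_cons.mp this with rfl | h'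
      · exact hc0 rfl
      · exact hc1 (List.mem_singleton.mp h')
    have h2 : l.all (fun c => c == '0' || c == '1') = false := by
      rw [Bool.eq_false_iff]
      intro hall
      rw [List.all_eq_true] at hall
      rcases Bool.or_eq_true _ _ |>.mp (hall c hc) with h' | h'
      · exact hc0 (by simpa using h')
      · exact hc1 (by simpa using h')
    rw [h1, h2]

-- ---- the dictionaries of both ports, characterized ----

theorem pvHistData_items (S : List String) :
    (pvHistData S).items = (PySem.Set.ofList S).map (fun k => (k, (S.count k : Int))) := by
  unfold pvHistData
  rw [PySem.Dict.items_foldl_insert_fresh (PySem.Set.ofList S) (fun row => row)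
      (fun row => (S.count row : Int)) PySem.Dict.empty (fun a _ => by simp)
      (by simp [PySem.Set.nodup_ofList])]
  rfl

theorem pvCountsDict_items (S : List String) (hns : ∀ s ∈ S, ' ' ∉ s.toList) :
    (pvCountsDict (pvHistData S)).items
      = (PySem.Set.ofList S).map (fun k => (k, (S.count k : Int))) := by
  unfold pvCountsDict
  rw [pvHistData_items]
  rw [PySem.List.foldl_congr_mem _ _ (fun d p => d.insert p.1 p.2) _ (by
    intro acc p hp
    obtain ⟨k, hk, rfl⟩ := List.mem_map.mp hp
    have : ' ' ∉ k.toList := hns k ((PySem.Set.mem_ofList S k).mp hk)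
    rw [pv_replace_id k this])]
  rw [PySem.Dict.items_foldl_insert_fresh _ Prod.fst Prod.snd PySem.Dict.empty
      (fun a _ => by simp)
      (by
        have h : List.map (Prod.fst ∘ fun k => (k, (S.count k : Int))) (PySem.Set.ofList S)
            = PySem.Set.ofList S := List.map_congr_left (fun _ _ => rfl) |>.trans (List.map_id _)
        rw [List.map_map, h]
        exact PySem.Set.nodup_ofList S)]
  have h2 : List.map ((fun a => a) ∘ fun k => (k, (S.count k : Int))) (PySem.Set.ofList S)
      = List.map (fun k => (k, (S.count k : Int))) (PySem.Set.ofList S) :=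
    List.map_congr_left (fun _ _ => rfl)
  rw [List.map_map, h2]
  rfl

theorem pvCountsDict_keys (S : List String) (hns : ∀ s ∈ S, ' ' ∉ s.toList) :
    (pvCountsDict (pvHistData S)).keys = PySem.Set.ofList S := by
  simp only [PySem.Dict.keys, pvCountsDict_items S hns, List.map_map]
  exact List.map_congr_left (fun _ _ => rfl) |>.trans (List.map_id _)

theorem pvCountsDict_getD_mem (S : List String) (hns : ∀ s ∈ S, ' ' ∉ s.toList)
    (k : String) (hk : k ∈ S) : (pvCountsDict (pvHistData S)).getD k 0 = (S.count k : Int) := by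
  refine PySem.Dict.getD_of_mem_items _ ?_ ?_ 0
  · rw [pvCountsDict_items S hns]
    exact List.mem_map.mpr ⟨k, (PySem.Set.mem_ofList S k).mpr hk, rfl⟩
  · rw [pvCountsDict_keys S hns]
    exact PySem.Set.nodup_ofList S

theorem pvCountsDict_getD_not_mem (S : List String) (hns : ∀ s ∈ S, ' ' ∉ s.toList)
    (k : String) (hk : k ∉ S) : (pvCountsDict (pvHistData S)).getD k 0 = 0 := by
  have hkeys : k ∉ (pvCountsDict (pvHistData S)).keys := by
    rw [pvCountsDict_keys S hns, PySem.Set.mem_ofList]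
    exact hk
  have h := (PySem.Dict.get?_eq_none_iff_not_mem_keys _ k).mpr hkeys
  simp [PySem.Dict.getD, h]

theorem pvTally_eq (counts : List (List Int)) :
    pvTally counts = PySem.Dict.counter (pvRowStrings counts) := by
  unfold pvTally pvRowStrings
  rw [← PySem.Dict.foldl_insert_getD_add_one_eq_counter, List.foldl_map]

-- a fold of `if v ≠ 0 then insert` over fresh distinct keys appends the filtered pairs

theorem pvNonZero_aux (ps : List (String × Int)) : ∀ (d : PySem.Dict String Int),
    (∀ p ∈ ps, d.contains p.1 = false) → (ps.map Prod.fst).Nodup →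
    (ps.foldl (fun d p => if p.2 ≠ 0 then d.insert p.1 p.2 else d) d).items
      = d.items ++ ps.filter (fun p => decide (p.2 ≠ 0)) := by
  induction ps with
  | nil => intro d _ _; simp
  | cons p ps ih =>
    intro d hfresh hnd
    rw [List.map_cons] at hnd
    have hnd' := List.nodup_cons.mp hnd
    simp only [List.foldl_cons]
    by_cases hp : p.2 ≠ 0
    · rw [if_pos hp]
      have hc : d.contains p.1 = false := hfresh p List.mem_cons_self
      rw [ih (d.insert p.1 p.2) (by
            intro q hq
            rw [PySem.Dict.contains_insert]
            have hqp : q.1 ≠ p.1 := by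
              intro he
              exact hnd'.1 (he ▸ List.mem_map.mpr ⟨q, hq, rfl⟩)
            simp [hqp, hfresh q (List.mem_cons_of_mem p hq)])
          hnd'.2]
      rw [PySem.Dict.items_insert_of_not_contains d p.2 hc]
      simp [hp]
    · rw [if_neg hp]
      rw [ih d (fun q hq => hfresh q (List.mem_cons_of_mem p hq)) hnd'.2]
      simp at hp
      simp [hp]

theorem pvNonZero_items (fc : PySem.Dict String Int) (hnd : (fc.items.map Prod.fst).Nodup) :
    (pvNonZero fc).items = fc.items.filter (fun p => decide (p.2 ≠ 0)) := by
  unfold pvNonZero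
  rw [pvNonZero_aux fc.items PySem.Dict.empty (fun p _ => PySem.Dict.contains_empty p.1) hnd]
  rfl

-- ---- the two ports against the common middle form ----

def pvMid (counts : List (List Int)) (w : Int) : List (String × Int) :=
  ((PySem.List.sorted (PySem.Set.ofList (pvRowStrings counts)) (fun k => k) false).filter
      (fun k => PySem.Str.len k == w && k.toList.all (fun c => c == '0' || c == '1'))).map
    (fun k => (k, ((pvRowStrings counts).count k : Int)))

theorem pv_basis_filter (w : Int) (l : List String) :
    l.filter (fun key => pvIsBasisState w key)
      = l.filter (fun k => PySem.Str.len k == w && k.toList.all (fun c => c == '0' || c == '1')) :=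
  List.filter_congr fun k _ => by
    simp only [pvIsBasisState, pv_issubset_binary]

theorem pvB_eq (counts : List (List Int)) (w : Int)
    (hw : PySem.List.max? ((pvTally counts).keys.map (fun k => PySem.Str.len k)) (fun x => x)
            = some w) :
    measurements_to_counts_py_alt counts = pvMid counts w := by
  simp only [measurements_to_counts_py_alt]
  rw [hw]
  simp only [pvTally_eq, PySem.Dict.keys_counter, PySem.Dict.getD_counter]
  rw [pv_basis_filter]
  rw [PySem.Dict.items_foldl_insert_fresh _ (fun k => k)
      (fun k => ((pvRowStrings counts).count k : Int)) PySem.Dict.empty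
      (fun a _ => by simp)
      (by
        simp only [List.map_id']
        exact ((PySem.List.sorted_perm _ _ _).nodup_iff.mpr
          (PySem.Set.nodup_ofList _)).filter _)]
  rfl

theorem pvA_eq (counts : List (List Int)) (w : Int)
    (hw : PySem.List.max?
            ((pvCountsDict (pvHistData (pvRowStrings counts))).keys.map (fun k => PySem.Str.len k))
            (fun x => x) = some w)
    (hw1 : 1 ≤ w) :
    measurements_to_counts_py counts = pvMid counts w := by
  set S := pvRowStrings counts with hS
  have hns : ∀ s ∈ S, ' ' ∉ s.toList := by
    intro s hs
    obtain ⟨row, _, rfl⟩ := List.mem_map.mp hs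
    exact pv_key_no_space row
  set cd := pvCountsDict (pvHistData S) with hcd
  set W := w.toNat with hWdef
  have hW1 : 1 ≤ W := by omega
  have hWw : (W : Int) = w := by omega
  simp only [measurements_to_counts_py]
  rw [hw]
  show (pvNonZero (pvFinalCounts cd (pvAllKeys W))).items = pvMid counts w
  -- the sorted all_keys list is all_keys itself
  have hsorted : (pvAllKeys W).mergeSort (fun a b => decide (a ≤ b)) = pvAllKeys W :=
    List.mergeSort_eq_self LE.le ((pvAllKeys_pairwise W hW1).imp fun h => le_of_lt h)
  have hnodupAK : (pvAllKeys W).Nodup :=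
    (pvAllKeys_pairwise W hW1).imp fun h => ne_of_lt h
  have fcitems : (pvFinalCounts cd (pvAllKeys W)).items
      = (pvAllKeys W).map (fun key => (key, cd.getD key 0)) := by
    unfold pvFinalCounts
    rw [hsorted]
  have hproj : List.map (Prod.fst ∘ fun key => (key, cd.getD key 0)) (pvAllKeys W)
      = pvAllKeys W := (List.map_congr_left fun _ _ => rfl).trans (List.map_id _)
  rw [pvNonZero_items _ (by rw [fcitems, List.map_map, hproj]; exact hnodupAK)]
  rw [fcitems, List.filter_map]
  have hfc : List.filter ((fun p => decide (p.2 ≠ 0)) ∘ fun key => (key, cd.getD key 0))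
        (pvAllKeys W)
      = List.filter (fun k => decide (k ∈ S)) (pvAllKeys W) := by
    refine List.filter_congr fun k _ => ?_
    simp only [Function.comp_apply, decide_eq_decide]
    by_cases hk : k ∈ S
    · rw [hcd, pvCountsDict_getD_mem S hns k hk]
      simp [Int.natCast_eq_zero, List.count_eq_zero, hk]
    · rw [hcd, pvCountsDict_getD_not_mem S hns k hk]
      simp [hk]
  rw [hfc]
  set LA := List.filter (fun k => decide (k ∈ S)) (pvAllKeys W) with hLA
  have hmapA : LA.map (fun key => (key, cd.getD key 0))
      = LA.map (fun k => (k, (S.count k : Int))) := by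
    refine List.map_congr_left fun k hk => ?_
    have hkS : k ∈ S := by
      have := (List.mem_filter.mp hk).2
      simpa using this
    rw [hcd, pvCountsDict_getD_mem S hns k hkS]
  rw [hmapA]
  -- the B-side key list
  set LB := (PySem.List.sorted (PySem.Set.ofList S) (fun k => k) false).filter
      (fun k => PySem.Str.len k == w && k.toList.all (fun c => c == '0' || c == '1')) with hLB
  have hpwB : LB.Pairwise (· < ·) := (PySem.List.sorted_ofList_pairwise_lt S).filter _
  have hpwA : LA.Pairwise (· < ·) := (pvAllKeys_pairwise W hW1).filter _
  have hmem : ∀ k, k ∈ LA ↔ k ∈ LB := by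
    intro k
    rw [hLA, hLB, List.mem_filter, List.mem_filter, PySem.List.mem_sorted,
      PySem.Set.mem_ofList, pvAllKeys_mem W hW1]
    constructor
    · rintro ⟨⟨hlen, hbin⟩, hkS⟩
      refine ⟨by simpa using hkS, ?_⟩
      simp only [Bool.and_eq_true, beq_iff_eq, List.all_eq_true, PySem.Str.len_eq]
      exact ⟨by omega, fun c hc => by rcases hbin c hc with rfl | rfl <;> simp⟩
    · rintro ⟨hkS, hpred⟩
      simp only [Bool.and_eq_true, beq_iff_eq, List.all_eq_true, PySem.Str.len_eq] at hpred
      refine ⟨⟨by omega, fun c hc => ?_⟩, by simpa using hkS⟩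
      rcases Bool.or_eq_true _ _ |>.mp (hpred.2 c hc) with h | h
      · exact Or.inl (by simpa using h)
      · exact Or.inr (by simpa using h)
  have hperm : LA.Perm LB :=
    (List.perm_ext_iff_of_nodup (hpwA.imp fun h => ne_of_lt h)
      (hpwB.imp fun h => ne_of_lt h)).mpr hmem
  have hBB : PySem.List.sorted LB (fun k => k) false = LB :=
    PySem.List.sorted_eq_self_of_pairwise _ _ (hpwB.imp fun h => le_of_lt h)
  have hAB : PySem.List.sorted LB (fun k => k) false = LA :=
    PySem.List.sorted_eq_of_perm_of_pairwise_lt LB LA _ hperm hpwA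
  rw [hAB.symm.trans hBB]
  rfl


theorem pv_join_head (x : List Char) (xs : List (List Char)) :
    PySem.Chars.join [] (x :: xs) = x ++ PySem.Chars.join [] xs := by
  cases xs with
  | nil => simp [PySem.Chars.join, List.intercalate]
  | cons y ys => simp [PySem.Chars.join, List.intercalate, List.intersperse]

theorem pv_toChars_ne_nil (n : Int) : PySem.Int.toChars n ≠ [] := by
  unfold PySem.Int.toChars
  split
  · simp
  · exact pv_td_ne_nil 10 _

theorem pv_key_len (row : List Int) (h : row ≠ []) :
    1 ≤ (PySem.Str.join "" (row.map PySem.Int.toStr)).toList.length := by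
  match row with
  | r :: t =>
    rw [PySem.Str.toList_join]
    have : ("" : String).toList = [] := rfl
    rw [this, List.map_cons, List.map_cons, pv_join_head, List.length_append]
    have h1 : (PySem.Int.toStr r).toList ≠ [] := by
      rw [PySem.Int.toList_toStr]; exact pv_toChars_ne_nil r
    have := List.length_pos_iff.mpr h1
    omega

theorem pv_ofList_const (x : String) : ∀ (l : List String), l ≠ [] → (∀ y ∈ l, y = x) →
    PySem.Set.ofList l = [x] := by
  have aux : ∀ (t : List String), (∀ y ∈ t, y = x) →
      t.foldl PySem.Set.add [x] = [x] := by
    intro t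
    induction t with
    | nil => intro _; rfl
    | cons y ys ih =>
      intro h
      have hy : y = x := h y List.mem_cons_self
      subst hy
      have : PySem.Set.add [y] y = [y] := by simp [PySem.Set.add, PySem.Set.contains]
      simp only [List.foldl_cons, this]
      exact ih fun z hz => h z (List.mem_cons_of_mem y hz)
  intro l hne hall
  match l with
  | a :: t =>
    have ha : a = x := hall a List.mem_cons_self
    subst ha
    show (a :: t).foldl PySem.Set.add [] = [a]
    simp only [List.foldl_cons]
    have : PySem.Set.add [] a = [a] := rfl
    rw [this]
    exact aux t fun z hz => hall z (List.mem_cons_of_mem a hz)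

theorem pv_all_empty_A (counts : List (List Int)) (hne : counts ≠ [])
    (hall : ∀ row ∈ counts, row = []) : measurements_to_counts_py counts = [] := by
  set S := pvRowStrings counts with hS
  have hns : ∀ s ∈ S, ' ' ∉ s.toList := by
    intro s hs
    obtain ⟨row, _, rfl⟩ := List.mem_map.mp hs
    exact pv_key_no_space row
  have hSall : ∀ s ∈ S, s = "" := by
    intro s hs
    obtain ⟨row, hrow, rfl⟩ := List.mem_map.mp hs
    rw [hall row hrow]
    rfl
  have hSne : S ≠ [] := by
    match counts, hne with
    | c :: cs, _ => simp [hS, pvRowStrings]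
  have hSA : PySem.Set.ofList S = [""] := pv_ofList_const "" S hSne hSall
  -- A returns []
  have hwA : PySem.List.max?
      ((pvCountsDict (pvHistData S)).keys.map (fun k => PySem.Str.len k)) (fun x => x)
      = some 0 := by
    rw [pvCountsDict_keys S hns, hSA]
    decide
  have hgetD : (pvCountsDict (pvHistData S)).getD "0" 0 = 0 := by
    refine pvCountsDict_getD_not_mem S hns "0" fun hmem => ?_
    have := hSall "0" hmem
    simp at this
  simp only [measurements_to_counts_py]
  rw [hwA]
  show (pvNonZero (pvFinalCounts (pvCountsDict (pvHistData S))
    (pvAllKeys (0 : Int).toNat))).items = []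
  have hak : pvAllKeys (0 : Int).toNat = ["0"] := by decide
  rw [hak]
  unfold pvFinalCounts
  rw [show (["0"] : List String).mergeSort (fun a b => decide (a ≤ b)) = ["0"] from by simp]
  simp only [List.map_cons, List.map_nil]
  rw [hgetD]
  decide

-- ===== VERDICT (by name: the statement is the Claim_ definition above) =====
theorem measurements_to_counts_py_spec : Claim_unchanged_measurements_to_counts_py := by
  intro counts hdom hpre hnD
  set S := pvRowStrings counts with hS
  have hns : ∀ s ∈ S, ' ' ∉ s.toList := by
    intro s hs
    obtain ⟨row, _, rfl⟩ := List.mem_map.mp hs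
    exact pv_key_no_space row
  obtain ⟨row, hrow, hrne⟩ : ∃ row ∈ counts, row ≠ [] := by
    by_contra h
    push Not at h
    exact hnD ⟨hpre, h⟩
  have hkmem : PySem.Str.join "" (row.map PySem.Int.toStr) ∈ S :=
    List.mem_map.mpr ⟨row, hrow, rfl⟩
  set key := PySem.Str.join "" (row.map PySem.Int.toStr) with hkey
  have hklen : 1 ≤ key.toList.length := pv_key_len row hrne
  cases hmax : PySem.List.max? ((PySem.Set.ofList S).map (fun k => PySem.Str.len k))
      (fun x => x) with
  | none =>
    rw [PySem.List.max?_eq_none_iff, List.map_eq_nil_iff] at hmax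
    exact absurd (hmax ▸ (PySem.Set.mem_ofList S key).mpr hkmem) (List.not_mem_nil)
  | some w =>
    have hw1 : 1 ≤ w := by
      have hle := PySem.List.max?_isMax hmax (PySem.Str.len key)
        (List.mem_map.mpr ⟨key, (PySem.Set.mem_ofList S key).mpr hkmem, rfl⟩)
      rw [PySem.Str.len_eq] at hle
      omega
    have hwA : PySem.List.max?
        ((pvCountsDict (pvHistData S)).keys.map (fun k => PySem.Str.len k)) (fun x => x)
        = some w := by rw [pvCountsDict_keys S hns]; exact hmax
    have hwB : PySem.List.max? ((pvTally counts).keys.map (fun k => PySem.Str.len k))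
        (fun x => x) = some w := by
      rw [pvTally_eq, PySem.Dict.keys_counter]; exact hmax
    rw [pvA_eq counts w hwA hw1, pvB_eq counts w hwB]

theorem measurements_to_counts_py_changed : Claim_changed_measurements_to_counts_py := by
  unfold Claim_changed_measurements_to_counts_py
  refine ⟨by decide, by decide, by decide, ?_, by decide, by decide⟩
  exact pv_all_empty_A [[]] (by simp) (by simp)

theorem measurements_to_counts_py_tight : Claim_exact_measurements_to_counts_py := by
  intro counts hdom hpre hD
  obtain ⟨hne, hall⟩ := hD
  set S := pvRowStrings counts with hS
  have hns : ∀ s ∈ S, ' ' ∉ s.toList := by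
    intro s hs
    obtain ⟨row, _, rfl⟩ := List.mem_map.mp hs
    exact pv_key_no_space row
  have hSall : ∀ s ∈ S, s = "" := by
    intro s hs
    obtain ⟨row, hrow, rfl⟩ := List.mem_map.mp hs
    rw [hall row hrow]
    rfl
  have hSne : S ≠ [] := by
    match counts, hne with
    | c :: cs, _ => simp [hS, pvRowStrings]
  have hSA : PySem.Set.ofList S = [""] := pv_ofList_const "" S hSne hSall
  have hA : measurements_to_counts_py counts = [] := pv_all_empty_A counts hne hall
  -- B returns a nonempty list
  have hB : measurements_to_counts_py_alt counts ≠ [] := by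
    simp only [measurements_to_counts_py_alt, pvTally_eq, PySem.Dict.keys_counter]
    rw [show pvRowStrings counts = S from rfl, hSA]
    rw [show PySem.List.max? ((["" ] : List String).map (fun k => PySem.Str.len k))
      (fun x => x) = some 0 from by decide]
    rw [show PySem.List.sorted [""] (fun k => k) false = [""] from by decide]
    show (List.foldl (fun d k => d.insert k ((PySem.Dict.counter S).getD k 0)) PySem.Dict.empty
        (List.filter (fun key => pvIsBasisState 0 key) [""])).items ≠ []
    rw [show List.filter (fun key => pvIsBasisState 0 key) [""] = [""] from by decide]
    simp only [List.foldl_cons, List.foldl_nil]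
    rw [PySem.Dict.items_insert_of_not_contains _ _ (PySem.Dict.contains_empty _)]
    simp
  rw [hA]
  exact fun h => hB h.symm
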